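-- pv_equiv track=rewrite | github.com/chrys5/adventofcode | 2025/04.py | part2
-- ===== SOURCE A (Python) =====
-- from typing import List
-- import copy
--
-- def part1(contents: List):
--     """
--     TODO: part 1 solution
--     """
--     DIR = [
--         (0, 1),   # right
--         (1, 0),   # down
--         (0, -1),  # left
--         (-1, 0),  # up
--         (1, 1),   # down-right
--         (1, -1),  # down-left
--         (-1, 1),  # up-right
--         (-1, -1)  # up-left
--     ]
--
--     accessable_toilet_papers = 0
--     accessable_coords = []
--     for i, row in enumerate(contents):
--         for j, char in enumerate(row):
--             if char != '@':
--                 continue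
--             adj_toilet_papers = 0
--             for d in DIR:
--                 adj_i = i + d[0]
--                 adj_j = j + d[1]
--                 if 0 <= adj_i < len(contents) and 0 <= adj_j < len(row) and contents[adj_i][adj_j] == '@':
--                     adj_toilet_papers += 1
--                 if adj_toilet_papers >= 4:
--                     break
--
--             if adj_toilet_papers < 4:
--                 accessable_toilet_papers += 1
--                 accessable_coords.append((i, j))
--     return accessable_toilet_papers, accessable_coords
--
-- def part2(contents: List):
--     """
--     TODO: part 2 solution
--     """
--
--     accessable_toilet_papers_total = 0
--     map_over_time = [copy.deepcopy(contents)]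
--     while True:
--         accessable_toilet_papers, accessable_coords = part1(contents)
--         accessable_toilet_papers_total += accessable_toilet_papers
--         for coord in accessable_coords:
--             contents[coord[0]][coord[1]] = '.'
--         map_over_time.append(copy.deepcopy(contents))
--         if accessable_toilet_papers == 0:
--             break
--
--     return accessable_toilet_papers_total, map_over_time
-- ===== SOURCE B (Python) =====
-- import copy
--
-- def _triples(r):
--     # horizontal 3-window sums of a 0/1 row
--     return [(r[j - 1] if j > 0 else 0) + r[j] + (r[j + 1] if j + 1 < len(r) else 0)
--             for j in range(len(r))]
--
-- def part2(contents):
--     # Separable-convolution rounds: indicator grid -> horizontal triple sums ->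
--     # vertical triple sum gives each cell's 8-neighbour count; peel cells with
--     # count < 4 a generation at a time.  Mutates `contents` in place like A.
--     total = 0
--     snaps = [copy.deepcopy(contents)]
--     while True:
--         ind = [[1 if c == '@' else 0 for c in row] for row in contents]
--         h = [_triples(r) for r in ind]
--         removed = 0
--         for i, row in enumerate(contents):
--             for j in range(len(row)):
--                 if row[j] == '@':
--                     cnt = ((h[i - 1][j] if i > 0 else 0)
--                            + h[i][j]
--                            + (h[i + 1][j] if i + 1 < len(contents) else 0) - 1)
--                     if cnt < 4:
--                         removed += 1
--                         row[j] = '.'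
--         total += removed
--         snaps.append(copy.deepcopy(contents))
--         if removed == 0:
--             break
--     return total, snaps
-- ===== Notes on version B (the rewrite author's own statement) =====
-- stated objective: alternative
-- what changed: Each round's per-cell 8-direction probe loop (with early break) is replaced by a separable 3x3 convolution: a 0/1 indicator grid, horizontal 3-window sums, then a vertical 3-sum minus the cell itself gives every neighbour count, and the new grid is built cell-by-cell from it instead of collecting coordinates and writing through them.
import Mathlib
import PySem

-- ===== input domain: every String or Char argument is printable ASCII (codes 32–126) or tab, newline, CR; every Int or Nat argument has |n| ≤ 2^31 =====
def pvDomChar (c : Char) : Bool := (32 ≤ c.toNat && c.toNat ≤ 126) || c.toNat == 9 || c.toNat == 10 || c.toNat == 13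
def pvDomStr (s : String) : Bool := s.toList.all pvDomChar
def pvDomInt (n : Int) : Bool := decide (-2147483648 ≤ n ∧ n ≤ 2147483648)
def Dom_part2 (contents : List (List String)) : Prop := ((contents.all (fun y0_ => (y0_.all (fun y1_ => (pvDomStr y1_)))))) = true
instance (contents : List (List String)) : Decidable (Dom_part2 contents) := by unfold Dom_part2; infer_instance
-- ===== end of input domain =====

-- B replaces A's per-cell 8-direction probing (with early break) by a separable 3x3 window
-- convolution over a 0/1 indicator grid, and builds each round's new grid directly instead of
-- collecting coordinates and writing through them; objective: alternative structure, same cost.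
-- Both Pythons mutate `contents` in place identically; the theorems are about the return value.

-- ===== PORT A =====
def pyDIR : List (Int × Int) := [(0,1),(1,0),(0,-1),(-1,0),(1,1),(1,-1),(-1,1),(-1,-1)]

-- contents[adj_i][adj_j]; the row index is bounds-pre-checked in A, the column index is checked
-- against the *scanned* row's length, so on ragged grids Python can raise IndexError (excluded
-- by Pre_part2); inside Pre_part2 this getD-lookup is exact.
def cellA (g : List (List String)) (a b : Int) : String :=
  PySem.List.pyGetD (PySem.List.pyGetD g a []) b ""

def adjLoopA (g : List (List String)) (rowLen : Int) (i j : Int) : List (Int × Int) → Int → Int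
  | [], acc => acc
  | d :: rest, acc =>
      let ai := i + d.1
      let aj := j + d.2
      let acc' := if 0 ≤ ai ∧ ai < (g.length : Int) ∧ 0 ≤ aj ∧ aj < rowLen ∧ cellA g ai aj = "@" then acc + 1 else acc
      if 4 ≤ acc' then acc' else adjLoopA g rowLen i j rest acc'

def part1A (g : List (List String)) : Int × List (Int × Int) :=
  (PySem.List.enumerate g 0).foldl (fun st ir =>
    (PySem.List.enumerate ir.2 0).foldl (fun st2 jc =>
      if jc.2 ≠ "@" then st2
      else if adjLoopA g (ir.2.length : Int) ir.1 jc.1 pyDIR 0 < 4 then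
        (st2.1 + 1, st2.2 ++ [(ir.1, jc.1)])
      else st2) st) (0, [])

-- contents[c0][c1] = '.'; coordinates come from enumerate, hence are in range: pySetD is exact
def setDot (g : List (List String)) (c : Int × Int) : List (List String) :=
  PySem.List.pySetD g c.1 (PySem.List.pySetD (PySem.List.pyGetD g c.1 []) c.2 ".")

-- fuel for the `while True` loop (totalization only): each continuing round clears ≥ 1 cell
def cellCountA (g : List (List String)) : Nat := g.foldl (fun n r => n + r.length) 0

def loopA : Nat → List (List String) → Int → List (List (List String)) → Int × List (List (List String))
  | 0, _, tot, maps => (tot, maps)  -- unreachable: the fuel exceeds the number of rounds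
  | fuel+1, g, tot, maps =>
      let pr := part1A g
      let tot' := tot + pr.1
      let g' := pr.2.foldl setDot g
      let maps' := maps ++ [g']
      if pr.1 = 0 then (tot', maps') else loopA fuel g' tot' maps'

def part2 (contents : List (List String)) : Int × List (List (List String)) :=
  loopA (cellCountA contents + 1) contents 0 [contents]

-- ===== PORT B =====
def ind1 (row : List String) : List Int := row.map (fun c => if c = "@" then 1 else 0)

def tripleAt (r : List Int) (j : Int) : Int :=
  (if 0 < j then PySem.List.pyGetD r (j-1) 0 else 0) + PySem.List.pyGetD r j 0
    + (if j + 1 < (r.length : Int) then PySem.List.pyGetD r (j+1) 0 else 0)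

def triples (r : List Int) : List Int := (PySem.List.pyRange 0 (r.length) 1).map (tripleAt r)

-- h[i-1][j] + h[i][j] + h[i+1][j] - 1; the h-lookups are exact inside Pre_part2 (on ragged
-- grids with '@' Python B can raise IndexError here — excluded by Pre_part2)
def cntB (h : List (List Int)) (glen : Int) (i j : Int) : Int :=
  (if 0 < i then PySem.List.pyGetD (PySem.List.pyGetD h (i-1) []) j 0 else 0)
  + PySem.List.pyGetD (PySem.List.pyGetD h i []) j 0
  + (if i + 1 < glen then PySem.List.pyGetD (PySem.List.pyGetD h (i+1) []) j 0 else 0) - 1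

def rowScanB (h : List (List Int)) (glen : Int) (i : Int) (row : List String) (removed : Int) :
    Int × List String :=
  (PySem.List.pyRange 0 (row.length) 1).foldl (fun st j =>
    if PySem.List.pyGetD st.2 j "" = "@" then
      if cntB h glen i j < 4 then (st.1 + 1, PySem.List.pySetD st.2 j ".") else st
    else st) (removed, row)

def roundB (g : List (List String)) : Int × List (List String) :=
  let ind := g.map ind1
  let h := ind.map triples
  (PySem.List.enumerate g 0).foldl (fun st ir =>
    let res := rowScanB h (g.length : Int) ir.1 ir.2 st.1
    (res.1, st.2 ++ [res.2])) (0, [])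

-- fuel for B's `while True` loop (totalization only), same bound
def cellCountB (g : List (List String)) : Nat := g.foldl (fun n r => n + r.length) 0

def loopB : Nat → List (List String) → Int → List (List (List String)) → Int × List (List (List String))
  | 0, _, tot, maps => (tot, maps)  -- unreachable: the fuel exceeds the number of rounds
  | fuel+1, g, tot, maps =>
      let pr := roundB g
      let tot' := tot + pr.1
      let maps' := maps ++ [pr.2]
      if pr.1 = 0 then (tot', maps') else loopB fuel pr.2 tot' maps'

def part2_alt (contents : List (List String)) : Int × List (List (List String)) :=
  loopB (cellCountB contents + 1) contents 0 [contents]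

-- ===== PRECONDITION & SPEC =====
-- Pre_ excludes ragged grids that contain '@': there A's neighbour probe contents[adj_i][adj_j]
-- (column-checked against the scanned row's length only) can raise IndexError; grids without '@'
-- are admitted whatever their shape.
def Pre_part2 (contents : List (List String)) : Prop :=
  (∀ row ∈ contents, row.length = (contents.headD []).length) ∨ (∀ row ∈ contents, "@" ∉ row)

instance (contents : List (List String)) : Decidable (Pre_part2 contents) := by
  unfold Pre_part2; infer_instance

def pvWitness_part2 : List (List String) := [["@", "@", "."], [".", "@", "@"], ["@", ".", "@"]]

def Spec_part2 (contents : List (List String)) (out : Int × List (List (List String))) : Prop := out = part2_alt contents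
instance (contents : List (List String)) (out : Int × List (List (List String))) : Decidable (Spec_part2 contents out) := by unfold Spec_part2; infer_instance

-- ===== CLAIM (what is proved, stated in full; the proofs are below) =====
def Claim_equal_part2 : Prop := ∀ (contents : List (List String)), Dom_part2 contents → Pre_part2 contents → Spec_part2 contents (part2 contents)


-- ===== LEMMAS AND PROOFS =====

-- generic shape of the two accumulating folds: a (counter, output-list) pair
theorem foldl_pair_acc {α β : Type} (l : List α) (body : (Int × List β) → α → (Int × List β))
    (K : α → Int) (F : α → List β)
    (hb : ∀ st, ∀ x ∈ l, body st x = (st.1 + K x, st.2 ++ F x)) :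
    ∀ st : Int × List β, l.foldl body st = (st.1 + (l.map K).sum, st.2 ++ l.flatMap F) := by
  induction l with
  | nil => intro st; simp
  | cons x l ih =>
      intro st
      rw [List.foldl_cons, hb st x (by simp),
        ih (fun st y hy => hb st y (List.mem_cons_of_mem _ hy))]
      simp [add_assoc]

theorem foldl_pair_count_append {α β : Type} (p : α → Bool) (f : α → β) :
    ∀ (l : List α) (st : Int × List β),
    l.foldl (fun st x => if p x then (st.1 + 1, st.2 ++ [f x]) else st) st
      = (st.1 + ((l.filter p).length : Int), st.2 ++ (l.filter p).map f) := by
  intro l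
  induction l with
  | nil => intro st; simp
  | cons x l ih =>
      intro st
      rw [List.foldl_cons]
      by_cases h : p x = true
      · simp only [h, if_true, ih, List.filter_cons, List.length_cons, List.map_cons]
        refine Prod.ext ?_ ?_ <;> simp <;> omega
      · simp only [h, ih, List.filter_cons]
        simp

theorem length_flatMap_int {α β : Type} (l : List α) (F : α → List β) :
    ((l.flatMap F).length : Int) = (l.map (fun x => (((F x).length : Nat) : Int))).sum := by
  induction l with
  | nil => simp
  | cons x l ih =>
      simp only [List.flatMap_cons, List.length_append, List.map_cons, List.sum_cons, ← ih]
      push_cast; ring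

-- canonical ("mathematical") description of one peeling round
def nbInd (g : List (List String)) (a b : Int) : Int :=
  if 0 ≤ a ∧ a < (g.length : Int) ∧ 0 ≤ b ∧ b < ((g.getD a.toNat []).length : Int)
      ∧ (g.getD a.toNat []).getD b.toNat "" = "@" then 1 else 0

def cnt8 (g : List (List String)) (i j : Int) : Int :=
  nbInd g i (j + 1) + nbInd g (i + 1) j + nbInd g i (j - 1) + nbInd g (i - 1) j
    + nbInd g (i + 1) (j + 1) + nbInd g (i + 1) (j - 1) + nbInd g (i - 1) (j + 1)
    + nbInd g (i - 1) (j - 1)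

def cellOf (g : List (List String)) (a b : Nat) : String := (g.getD a []).getD b ""

def predC (g : List (List String)) (a b : Nat) : Bool :=
  (cellOf g a b == "@") && decide (cnt8 g (a : Int) (b : Int) < 4)

def newRowC (g : List (List String)) (a : Nat) : List String :=
  (List.range (g.getD a []).length).map (fun b => if predC g a b then "." else cellOf g a b)

def stepG (g : List (List String)) : List (List String) :=
  (List.range g.length).map (newRowC g)

def pairC (a b : Nat) : Int × Int := ((a : Int), (b : Int))

def coordsC (g : List (List String)) : List (Int × Int) :=
  (List.range g.length).flatMap (fun a =>
    ((List.range (g.getD a []).length).filter (predC g a)).map (pairC a))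

def Rect (g : List (List String)) : Prop := ∀ row ∈ g, row.length = (g.headD []).length

theorem rect_row_len (g : List (List String)) (hg : Rect g) (a : Nat) (ha : a < g.length) :
    (g.getD a []).length = (g.headD []).length := by
  rw [List.getD_eq_getElem g [] ha]
  exact hg _ (List.getElem_mem ha)

-- the break in A's direction loop does not change the < 4 test
theorem adjLoopA_lt_iff (g : List (List String)) (rowLen i j : Int) :
    ∀ (l : List (Int × Int)) (acc : Int), acc < 4 →
    (adjLoopA g rowLen i j l acc < 4 ↔
      acc + (l.map (fun d => if 0 ≤ i + d.1 ∧ i + d.1 < (g.length : Int) ∧ 0 ≤ j + d.2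
          ∧ j + d.2 < rowLen ∧ cellA g (i + d.1) (j + d.2) = "@" then (1 : Int) else 0)).sum < 4) := by
  intro l
  induction l with
  | nil => intro acc h; simp [adjLoopA]
  | cons d rest ih =>
      intro acc hacc
      have hnn : 0 ≤ (rest.map (fun d => if 0 ≤ i + d.1 ∧ i + d.1 < (g.length : Int) ∧ 0 ≤ j + d.2
          ∧ j + d.2 < rowLen ∧ cellA g (i + d.1) (j + d.2) = "@" then (1 : Int) else 0)).sum := by
        refine List.sum_nonneg ?_
        intro x hx
        rcases List.mem_map.1 hx with ⟨y, _, rfl⟩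
        split <;> norm_num
      rw [List.map_cons, List.sum_cons, adjLoopA]
      by_cases hC : 0 ≤ i + d.1 ∧ i + d.1 < (g.length : Int) ∧ 0 ≤ j + d.2
          ∧ j + d.2 < rowLen ∧ cellA g (i + d.1) (j + d.2) = "@"
      · rw [if_pos hC, if_pos hC]
        by_cases h4 : (4 : Int) ≤ acc + 1
        · rw [if_pos h4]
          constructor <;> intro h <;> omega
        · rw [if_neg h4, ih (acc + 1) (by omega)]
          constructor <;> intro h <;> omega
      · rw [if_neg hC, if_neg hC]
        have h4 : ¬ (4 : Int) ≤ acc := by omega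
        rw [if_neg h4, ih acc hacc]
        constructor <;> intro h <;> omega

-- A's probe condition (column bound = scanned row's length) is the nbInd indicator, given Rect
theorem cond_eq_nbInd (g : List (List String)) (hg : Rect g) (ai aj : Int) :
    (if 0 ≤ ai ∧ ai < (g.length : Int) ∧ 0 ≤ aj ∧ aj < ((g.headD []).length : Int)
        ∧ cellA g ai aj = "@" then (1 : Int) else 0) = nbInd g ai aj := by
  unfold nbInd
  by_cases hrow : 0 ≤ ai ∧ ai < (g.length : Int)
  · have haN : ai.toNat < g.length := by omega
    have hlen : (g.getD ai.toNat []).length = (g.headD []).length := rect_row_len g hg _ haN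
    have hcellA : ∀ _ : 0 ≤ aj ∧ aj < ((g.getD ai.toNat []).length : Int),
        cellA g ai aj = (g.getD ai.toNat []).getD aj.toNat "" := by
      intro hj
      unfold cellA
      rw [PySem.List.pyGetD_eq_getElem g [] hrow.1 hrow.2,
        show g[ai.toNat] = g.getD ai.toNat [] from (List.getD_eq_getElem g [] haN).symm,
        PySem.List.pyGetD_eq_getElem _ "" hj.1 hj.2,
        List.getD_eq_getElem _ "" (by omega)]
    by_cases hcol : 0 ≤ aj ∧ aj < ((g.headD []).length : Int)
    · have hj : 0 ≤ aj ∧ aj < ((g.getD ai.toNat []).length : Int) := by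
        constructor
        · exact hcol.1
        · omega
      rw [hcellA hj]
      by_cases hat : (g.getD ai.toNat []).getD aj.toNat "" = "@"
      · rw [if_pos ⟨hrow.1, hrow.2, hcol.1, hcol.2, hat⟩, if_pos ⟨hrow.1, hrow.2, hj.1, hj.2, hat⟩]
      · rw [if_neg (by tauto), if_neg (by tauto)]
    · rw [if_neg (by tauto), if_neg (by intro h; exact hcol ⟨h.2.2.1, by omega⟩)]
  · rw [if_neg (by tauto), if_neg (by tauto)]

theorem adjA_iff_cnt8 (g : List (List String)) (hg : Rect g) (a b : Nat) (ha : a < g.length) :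
    (adjLoopA g ((g.getD a []).length : Int) (a : Int) (b : Int) pyDIR 0 < 4) ↔
      cnt8 g (a : Int) (b : Int) < 4 := by
  rw [adjLoopA_lt_iff g _ _ _ pyDIR 0 (by norm_num), rect_row_len g hg a ha]
  have hsum : ((pyDIR.map (fun d => if 0 ≤ (a : Int) + d.1 ∧ (a : Int) + d.1 < (g.length : Int)
      ∧ 0 ≤ (b : Int) + d.2 ∧ (b : Int) + d.2 < ((g.headD []).length : Int)
      ∧ cellA g ((a : Int) + d.1) ((b : Int) + d.2) = "@" then (1 : Int) else 0)).sum)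
        = cnt8 g (a : Int) (b : Int) := by
    simp only [pyDIR, List.map_cons, List.map_nil, List.sum_cons, List.sum_nil]
    simp only [cond_eq_nbInd g hg]
    unfold cnt8
    simp only [add_zero, ← sub_eq_add_neg]
    ring
  rw [hsum]
  omega

-- what A's enumerate-row scan collects, per row
def qA (g : List (List String)) (ir : Int × List String) (jc : Int × String) : Bool :=
  (jc.2 == "@") && decide (adjLoopA g (ir.2.length : Int) ir.1 jc.1 pyDIR 0 < 4)

def FA (g : List (List String)) (ir : Int × List String) : List (Int × Int) :=
  ((PySem.List.enumerate ir.2 0).filter (qA g ir)).map (fun jc => (ir.1, jc.1))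

theorem FA_eq (g : List (List String)) (hg : Rect g) (a : Nat) (ha : a < g.length) :
    FA g ((a : Int), g.getD a []) =
      ((List.range (g.getD a []).length).filter (predC g a)).map (pairC a) := by
  unfold FA
  rw [PySem.List.enumerate_eq_map_pyRange (g.getD a []) "", PySem.List.pyRange_one]
  simp only [PySem.List.len, Int.sub_zero, Int.toNat_natCast, zero_add, List.map_map]
  rw [List.filter_map, List.map_map]
  simp only [Function.comp_def]
  rw [List.filter_congr (q := predC g a) ?_]
  · refine List.map_congr_left ?_
    intro b _
    rfl
  · intro b hb
    show qA g _ ((b : Int), PySem.List.pyGetD (g.getD a []) (b : Int) "") = predC g a b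
    unfold qA predC cellOf
    simp only [PySem.List.pyGetD_natCast]
    have : decide (adjLoopA g ((g.getD a []).length : Int) (a : Int) (b : Int) pyDIR 0 < 4)
        = decide (cnt8 g (a : Int) (b : Int) < 4) :=
      decide_eq_decide.2 (adjA_iff_cnt8 g hg a b ha)
    rw [this]

-- round equalities (Rect case)
theorem part1A_eq_coordsC (g : List (List String)) (hg : Rect g) :
    part1A g = (((coordsC g).length : Int), coordsC g) := by
  unfold part1A
  rw [foldl_pair_acc _ _ (fun ir => (((PySem.List.enumerate ir.2 0).filter (qA g ir)).length : Int))
    (FA g) ?_]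
  · have hflat : (PySem.List.enumerate g 0).flatMap (FA g) = coordsC g := by
      rw [PySem.List.enumerate_eq_map_pyRange g [], PySem.List.pyRange_one]
      simp only [PySem.List.len, Int.sub_zero, Int.toNat_natCast, zero_add, List.map_map]
      rw [List.flatMap_map]
      unfold coordsC
      refine List.flatMap_congr ?_
      intro a haR
      have ha : a < g.length := List.mem_range.1 haR
      show FA g ((a : Int), PySem.List.pyGetD g (a : Int) []) = _
      rw [show PySem.List.pyGetD g (a : Int) [] = g.getD a [] from PySem.List.pyGetD_natCast g a []]
      exact FA_eq g hg a ha
    refine Prod.ext ?_ ?_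
    · show 0 + ((PySem.List.enumerate g 0).map _).sum = ((coordsC g).length : Int)
      rw [zero_add, ← hflat, length_flatMap_int]
      refine congrArg List.sum (List.map_congr_left ?_)
      intro ir _
      show (((PySem.List.enumerate ir.2 0).filter (qA g ir)).length : Int) = ((FA g ir).length : Int)
      unfold FA
      rw [List.length_map]
    · show [] ++ (PySem.List.enumerate g 0).flatMap (FA g) = coordsC g
      rw [List.nil_append, hflat]
  · intro st ir _
    rw [PySem.List.foldl_congr_mem _ _
      (fun st2 jc => if qA g ir jc then (st2.1 + 1, st2.2 ++ [(ir.1, jc.1)]) else st2) st ?_]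
    · rw [foldl_pair_count_append]
      rfl
    · intro st2 jc _
      by_cases h1 : jc.2 = "@"
      · by_cases h2 : adjLoopA g (ir.2.length : Int) ir.1 jc.1 pyDIR 0 < 4
        · simp [qA, h1, h2]
        · simp [qA, h1, h2]
      · simp [qA, h1]

theorem mem_coordsC (g : List (List String)) (x : Int × Int) :
    x ∈ coordsC g ↔ ∃ a b : Nat, a < g.length ∧ b < (g.getD a []).length ∧ predC g a b
      ∧ x = pairC a b := by
  unfold coordsC
  simp only [List.mem_flatMap, List.mem_range, List.mem_map, List.mem_filter]
  constructor
  · rintro ⟨a, ha, b, ⟨hbr, hp⟩, hx⟩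
    exact ⟨a, b, ha, hbr, hp, hx.symm⟩
  · rintro ⟨a, b, ha, hbr, hp, rfl⟩
    exact ⟨a, ha, b, ⟨hbr, hp⟩, rfl⟩

theorem getD_set' {α : Type} (l : List α) (i : Nat) (v : α) (j : Nat) (d : α) (hi : i < l.length) :
    (l.set i v).getD j d = if j = i then v else l.getD j d := by
  rw [List.getD_eq_getElem?_getD, List.getD_eq_getElem?_getD, List.getElem?_set]
  by_cases h : i = j
  · subst h
    simp [hi]
  · simp [h, Ne.symm h]

theorem setDot_cast (g : List (List String)) (a b : Nat) (ha : a < g.length)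
    (hb : b < (g.getD a []).length) :
    setDot g (pairC a b) = g.set a ((g.getD a []).set b ".") := by
  unfold setDot pairC
  show PySem.List.pySetD g (a : Int) (PySem.List.pySetD (PySem.List.pyGetD g (a : Int) []) (b : Int) ".") = _
  rw [PySem.List.pyGetD_natCast]
  unfold PySem.List.pySetD
  rw [PySem.List.pySet?_natCast (g.getD a []) b "." (by omega), PySem.List.pySet?_natCast g a _ ha]
  rfl

theorem foldl_setDot_spec :
    ∀ (cs : List (Int × Int)) (g : List (List String)),
    (∀ c ∈ cs, ∃ a b : Nat, c = pairC a b ∧ a < g.length ∧ b < (g.getD a []).length) →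
    ((cs.foldl setDot g).length = g.length) ∧
    (∀ a : Nat, ((cs.foldl setDot g).getD a []).length = (g.getD a []).length) ∧
    (∀ a b : Nat, b < (g.getD a []).length →
      ((cs.foldl setDot g).getD a []).getD b "" =
        if pairC a b ∈ cs then "." else (g.getD a []).getD b "") := by
  intro cs
  induction cs with
  | nil => intro g _; refine ⟨rfl, fun a => rfl, fun a b _ => by simp⟩
  | cons c cs ih =>
      intro g hbnd
      obtain ⟨a0, b0, rfl, ha0, hb0⟩ := hbnd c (by simp)
      have hset := setDot_cast g a0 b0 ha0 hb0
      set g' := g.set a0 ((g.getD a0 []).set b0 ".") with hg'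
      have hlen' : g'.length = g.length := by simp [hg']
      have hrowD : ∀ a : Nat, g'.getD a [] = if a = a0 then (g.getD a0 []).set b0 "." else g.getD a [] := by
        intro a
        exact getD_set' g a0 _ a [] ha0
      have hrowlen : ∀ a : Nat, (g'.getD a []).length = (g.getD a []).length := by
        intro a
        rw [hrowD a]
        by_cases h : a = a0
        · simp [h]
        · simp [h]
      have hbnd' : ∀ c ∈ cs, ∃ a b : Nat, c = pairC a b ∧ a < g'.length ∧ b < (g'.getD a []).length := by
        intro c hc
        obtain ⟨a, b, rfl, ha, hb⟩ := hbnd c (by simp [hc])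
        exact ⟨a, b, rfl, by omega, by rw [hrowlen]; omega⟩
      have hres := ih g' hbnd'
      rw [List.foldl_cons, hset]
      refine ⟨hres.1.trans hlen', fun a => (hres.2.1 a).trans (hrowlen a), ?_⟩
      intro a b hb
      rw [hres.2.2 a b (by rw [hrowlen]; omega)]
      by_cases hmem : pairC a b ∈ cs
      · rw [if_pos hmem, if_pos (by simp [hmem])]
      · rw [if_neg hmem]
        have hpair : (pairC a b = pairC a0 b0) ↔ (a = a0 ∧ b = b0) := by
          unfold pairC
          simp [Prod.ext_iff]
        by_cases heq : a = a0 ∧ b = b0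
        · rw [if_pos (by simp [List.mem_cons, heq]), hrowD a, if_pos heq.1, heq.2,
            getD_set' _ _ _ _ _ (by omega), if_pos rfl]
        · rw [if_neg (by simp [List.mem_cons, hpair, heq, hmem]), hrowD a]
          by_cases ha' : a = a0
          · have hbne : ¬ b = b0 := fun h => heq ⟨ha', h⟩
            rw [if_pos ha', ha', getD_set' _ _ _ _ _ (by omega), if_neg hbne]
          · rw [if_neg ha']

theorem length_stepG (g : List (List String)) : (stepG g).length = g.length := by
  unfold stepG; simp

theorem getD_stepG (g : List (List String)) (a : Nat) (ha : a < g.length) :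
    (stepG g).getD a [] = newRowC g a := by
  unfold stepG
  exact PySem.List.getD_map_range _ _ _ _ ha

theorem length_newRowC (g : List (List String)) (a : Nat) :
    (newRowC g a).length = (g.getD a []).length := by
  unfold newRowC; simp

theorem getD_newRowC (g : List (List String)) (a b : Nat) (hb : b < (g.getD a []).length) :
    (newRowC g a).getD b "" = if predC g a b then "." else (g.getD a []).getD b "" := by
  unfold newRowC
  rw [PySem.List.getD_map_range _ _ _ _ hb]
  unfold cellOf
  rfl

theorem foldl_setDot_coordsC (g : List (List String)) (hg : Rect g) :
    (coordsC g).foldl setDot g = stepG g := by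
  have hbnd : ∀ c ∈ coordsC g, ∃ a b : Nat, c = pairC a b ∧ a < g.length ∧ b < (g.getD a []).length := by
    intro c hc
    obtain ⟨a, b, ha, hb, _, rfl⟩ := (mem_coordsC g c).1 hc
    exact ⟨a, b, rfl, ha, hb⟩
  obtain ⟨h1, h2, h3⟩ := foldl_setDot_spec (coordsC g) g hbnd
  refine List.ext_getElem (by rw [h1, length_stepG]) ?_
  intro a ha1 ha2
  have ha : a < g.length := by omega
  refine List.ext_getElem ?_ ?_
  · rw [← List.getD_eq_getElem _ [] ha1, ← List.getD_eq_getElem _ [] ha2,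
      getD_stepG g a ha, length_newRowC, h2 a]
  · intro b hb1 hb2
    have hrl : b < (g.getD a []).length := by
      have := h2 a
      rw [List.getD_eq_getElem _ [] ha1] at this
      omega
    have e1 : ((coordsC g).foldl setDot g)[a][b] = (((coordsC g).foldl setDot g).getD a []).getD b "" := by
      rw [List.getD_eq_getElem _ [] ha1, List.getD_eq_getElem _ "" hb1]
    have e2 : (stepG g)[a][b] = ((stepG g).getD a []).getD b "" := by
      rw [List.getD_eq_getElem _ [] ha2, List.getD_eq_getElem _ "" hb2]
    rw [e1, e2, h3 a b hrl, getD_stepG g a ha, getD_newRowC g a b hrl]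
    have hmem : pairC a b ∈ coordsC g ↔ predC g a b = true := by
      rw [mem_coordsC]
      constructor
      · rintro ⟨a', b', _, _, hp, hx⟩
        have : a = a' ∧ b = b' := by
          unfold pairC at hx
          simpa [Prod.ext_iff] using hx
        rw [this.1, this.2]
        exact hp
      · intro hp
        exact ⟨a, b, ha, hrl, hp, rfl⟩
    by_cases hp : predC g a b
    · rw [if_pos (hmem.2 hp), if_pos hp]
    · rw [if_neg (fun h => hp (hmem.1 h)), if_neg hp]

theorem nbInd_eval (g : List (List String)) (a b : Nat) (ha : a < g.length)
    (hb : b < (g.getD a []).length) :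
    nbInd g (a : Int) (b : Int) = if (g.getD a []).getD b "" = "@" then 1 else 0 := by
  unfold nbInd
  simp only [Int.toNat_natCast]
  by_cases hc : (g.getD a []).getD b "" = "@"
  · rw [if_pos ⟨by omega, by omega, by omega, by omega, hc⟩, if_pos hc]
  · rw [if_neg (by tauto), if_neg hc]

theorem nbInd_zero_col (g : List (List String)) (a : Int) (b : Int)
    (h : ¬ (0 ≤ b ∧ b < ((g.getD a.toNat []).length : Int))) : nbInd g a b = 0 := by
  unfold nbInd
  rw [if_neg (by tauto)]

theorem nbInd_zero_row (g : List (List String)) (a : Int) (b : Int)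
    (h : ¬ (0 ≤ a ∧ a < (g.length : Int))) : nbInd g a b = 0 := by
  unfold nbInd
  rw [if_neg (by tauto)]

theorem length_ind1 (row : List String) : (ind1 row).length = row.length := by
  unfold ind1; simp

theorem indLookup (row : List String) (t : Int) (h0 : 0 ≤ t) (h1 : t < (row.length : Int)) :
    PySem.List.pyGetD (ind1 row) t 0 = if row.getD t.toNat "" = "@" then 1 else 0 := by
  unfold ind1
  rw [PySem.List.pyGetD_eq_getElem _ 0 h0 (by simpa using h1), List.getElem_map,
    List.getD_eq_getElem _ "" (by omega)]

theorem horiz (g : List (List String)) (a b : Nat) (ha : a < g.length)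
    (hb : b < (g.getD a []).length) :
    tripleAt (ind1 (g.getD a [])) (b : Int) =
      nbInd g (a : Int) ((b : Int) - 1) + nbInd g (a : Int) (b : Int) + nbInd g (a : Int) ((b : Int) + 1) := by
  unfold tripleAt
  rw [length_ind1]
  have hcen : PySem.List.pyGetD (ind1 (g.getD a [])) (b : Int) 0 = nbInd g (a : Int) (b : Int) := by
    rw [indLookup _ _ (by omega) (by omega), nbInd_eval g a b ha hb]
    simp
  have hlft : (if 0 < (b : Int) then PySem.List.pyGetD (ind1 (g.getD a [])) ((b : Int) - 1) 0 else 0)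
      = nbInd g (a : Int) ((b : Int) - 1) := by
    by_cases h0 : 0 < (b : Int)
    · have hcast : ((b : Int) - 1) = ((b - 1 : Nat) : Int) := by omega
      rw [if_pos h0, indLookup _ _ (by omega) (by omega), hcast, nbInd_eval g a (b - 1) ha (by omega)]
      simp
    · rw [if_neg h0, nbInd_zero_col g _ _ (by intro hcon; omega)]
  have hrgt : (if (b : Int) + 1 < ((g.getD a []).length : Int) then
        PySem.List.pyGetD (ind1 (g.getD a [])) ((b : Int) + 1) 0 else 0)
      = nbInd g (a : Int) ((b : Int) + 1) := by
    by_cases h1 : (b : Int) + 1 < ((g.getD a []).length : Int)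
    · rw [if_pos h1, indLookup _ _ (by omega) (by omega),
        show ((b : Int) + 1) = ((b + 1 : Nat) : Int) by omega, nbInd_eval g a (b + 1) ha (by omega)]
      simp
    · rw [if_neg h1, nbInd_zero_col g _ _ (by simp only [Int.toNat_natCast]; omega)]
  rw [hcen, hlft, hrgt]

theorem hLookup (g : List (List String)) (a : Nat) (ha : a < g.length) :
    PySem.List.pyGetD ((g.map ind1).map triples) (a : Int) [] = triples (ind1 (g.getD a [])) := by
  rw [PySem.List.pyGetD_natCast, List.map_map]
  have hlen : a < (List.map (triples ∘ ind1) g).length := by simpa using ha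
  rw [List.getD_eq_getElem _ [] hlen, List.getElem_map, Function.comp_apply,
    List.getD_eq_getElem _ [] ha]

theorem tripleVert (g : List (List String)) (hg : Rect g) (a b : Nat) (ha : a < g.length)
    (hb : b < (g.getD a []).length) :
    PySem.List.pyGetD (PySem.List.pyGetD ((g.map ind1).map triples) (a : Int) []) (b : Int) 0
      = tripleAt (ind1 (g.getD a [])) (b : Int) := by
  rw [hLookup g a ha]
  unfold triples
  have hblen : b < (ind1 (g.getD a [])).length := by rw [length_ind1]; omega
  exact PySem.List.pyGetD_map_pyRange _ _ _ _ hblen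

theorem cntB_eq (g : List (List String)) (hg : Rect g) (a b : Nat) (ha : a < g.length)
    (hb : b < (g.getD a []).length) (hcell : (g.getD a []).getD b "" = "@") :
    cntB ((g.map ind1).map triples) (g.length : Int) (a : Int) (b : Int) = cnt8 g (a : Int) (b : Int) := by
  have hW : ∀ a' : Nat, a' < g.length → (g.getD a' []).length = (g.getD a []).length := by
    intro a' ha'
    rw [rect_row_len g hg a' ha', rect_row_len g hg a ha]
  unfold cntB
  have htop : (if 0 < (a : Int) then
        PySem.List.pyGetD (PySem.List.pyGetD ((g.map ind1).map triples) ((a : Int) - 1) []) (b : Int) 0 else 0)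
      = nbInd g ((a : Int) - 1) ((b : Int) - 1) + nbInd g ((a : Int) - 1) (b : Int)
        + nbInd g ((a : Int) - 1) ((b : Int) + 1) := by
    by_cases h0 : 0 < (a : Int)
    · have hcast : ((a : Int) - 1) = ((a - 1 : Nat) : Int) := by omega
      rw [if_pos h0, hcast,
        tripleVert g hg (a - 1) b (by omega) (by rw [hW (a - 1) (by omega)]; omega),
        horiz g (a - 1) b (by omega) (by rw [hW (a - 1) (by omega)]; omega)]
    · rw [if_neg h0, nbInd_zero_row g _ _ (by omega), nbInd_zero_row g _ _ (by omega),
        nbInd_zero_row g _ _ (by omega)]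
      ring
  have hbot : (if (a : Int) + 1 < (g.length : Int) then
        PySem.List.pyGetD (PySem.List.pyGetD ((g.map ind1).map triples) ((a : Int) + 1) []) (b : Int) 0 else 0)
      = nbInd g ((a : Int) + 1) ((b : Int) - 1) + nbInd g ((a : Int) + 1) (b : Int)
        + nbInd g ((a : Int) + 1) ((b : Int) + 1) := by
    by_cases h1 : (a : Int) + 1 < (g.length : Int)
    · have hcast : ((a : Int) + 1) = ((a + 1 : Nat) : Int) := by omega
      rw [if_pos h1, hcast,
        tripleVert g hg (a + 1) b (by omega) (by rw [hW (a + 1) (by omega)]; omega),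
        horiz g (a + 1) b (by omega) (by rw [hW (a + 1) (by omega)]; omega)]
    · rw [if_neg h1, nbInd_zero_row g _ _ (by omega), nbInd_zero_row g _ _ (by omega),
        nbInd_zero_row g _ _ (by omega)]
      ring
  have hmid : PySem.List.pyGetD (PySem.List.pyGetD ((g.map ind1).map triples) (a : Int) []) (b : Int) 0
      = nbInd g (a : Int) ((b : Int) - 1) + nbInd g (a : Int) (b : Int) + nbInd g (a : Int) ((b : Int) + 1) := by
    rw [tripleVert g hg a b ha hb, horiz g a b ha hb]
  have hself : nbInd g (a : Int) (b : Int) = 1 := by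
    rw [nbInd_eval g a b ha hb, if_pos hcell]
  rw [htop, hbot, hmid, hself]
  unfold cnt8
  ring

def partRow (g : List (List String)) (a m : Nat) : List String :=
  (List.range (g.getD a []).length).map
    (fun b => if b < m ∧ predC g a b then "." else (g.getD a []).getD b "")

theorem length_partRow (g : List (List String)) (a m : Nat) :
    (partRow g a m).length = (g.getD a []).length := by
  unfold partRow; simp

theorem getElem_partRow (g : List (List String)) (a m b : Nat) (hb : b < (g.getD a []).length)
    (hb' : b < (partRow g a m).length) :
    (partRow g a m)[b] = if b < m ∧ predC g a b then "." else (g.getD a []).getD b "" := by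
  unfold partRow
  rw [List.getElem_map, List.getElem_range]

theorem partRow_zero (g : List (List String)) (a : Nat) : partRow g a 0 = g.getD a [] := by
  refine List.ext_getElem (by rw [length_partRow]) ?_
  intro b hb1 hb2
  rw [getElem_partRow g a 0 b (by omega) hb1, if_neg (by omega), List.getD_eq_getElem _ "" hb2]

theorem partRow_last (g : List (List String)) (a : Nat) :
    partRow g a (g.getD a []).length = newRowC g a := by
  refine List.ext_getElem (by rw [length_partRow, length_newRowC]) ?_
  intro b hb1 hb2
  have hb : b < (g.getD a []).length := by rw [length_partRow] at hb1; omega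
  rw [getElem_partRow g a _ b hb hb1,
    ← List.getD_eq_getElem _ "" hb2, getD_newRowC g a b hb]
  by_cases hp : predC g a b
  · rw [if_pos ⟨hb, hp⟩, if_pos hp]
  · rw [if_neg (by tauto), if_neg hp]

theorem partRow_set (g : List (List String)) (a m : Nat) (hm : m < (g.getD a []).length)
    (hp : predC g a m) : (partRow g a m).set m "." = partRow g a (m + 1) := by
  refine List.ext_getElem (by simp [length_partRow]) ?_
  intro b hb1 hb2
  have hb : b < (g.getD a []).length := by simpa [length_partRow] using hb2
  rw [List.getElem_set, getElem_partRow g a _ b hb (by simpa [length_partRow] using hb1),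
    getElem_partRow g a _ b hb hb2]
  by_cases he : m = b
  · rw [if_pos he, if_pos (by rw [← he]; exact ⟨by omega, hp⟩)]
  · rw [if_neg he]
    by_cases h1 : b < m ∧ predC g a b
    · rw [if_pos h1, if_pos ⟨by omega, h1.2⟩]
    · rw [if_neg h1, if_neg (by rintro ⟨hlt, hpb⟩; exact h1 ⟨by omega, hpb⟩)]

theorem partRow_frozen (g : List (List String)) (a m : Nat) (hp : ¬ predC g a m = true) :
    partRow g a m = partRow g a (m + 1) := by
  refine List.ext_getElem (by simp [length_partRow]) ?_
  intro b hb1 hb2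
  have hb : b < (g.getD a []).length := by simpa [length_partRow] using hb2
  rw [getElem_partRow g a _ b hb hb1, getElem_partRow g a _ b hb hb2]
  by_cases h1 : b < m ∧ predC g a b
  · rw [if_pos h1, if_pos ⟨by omega, h1.2⟩]
  · rw [if_neg h1, if_neg (by
      rintro ⟨hlt, hpb⟩
      rcases Nat.lt_or_ge b m with h | h
      · exact h1 ⟨h, hpb⟩
      · have : b = m := by omega
        exact hp (this ▸ hpb))]

theorem rowScanB_eq (g : List (List String)) (hg : Rect g) (a : Nat) (ha : a < g.length) (r0 : Int) :
    rowScanB ((g.map ind1).map triples) (g.length : Int) (a : Int) (g.getD a []) r0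
      = (r0 + (((List.range (g.getD a []).length).filter (predC g a)).length : Int), newRowC g a) := by
  unfold rowScanB
  rw [PySem.List.pyRange_one]
  simp only [Int.sub_zero, Int.toNat_natCast, zero_add, List.foldl_map]
  have main : ∀ m : Nat, m ≤ (g.getD a []).length →
      (List.range m).foldl (fun (st : Int × List String) (k : Nat) =>
        if PySem.List.pyGetD st.2 ((k : Nat) : Int) "" = "@" then
          if cntB ((g.map ind1).map triples) (g.length : Int) (a : Int) ((k : Nat) : Int) < 4 then
            (st.1 + 1, PySem.List.pySetD st.2 ((k : Nat) : Int) ".")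
          else st
        else st) (r0, g.getD a [])
      = (r0 + (((List.range m).filter (predC g a)).length : Int), partRow g a m) := by
    intro m
    induction m with
    | zero => intro _; simp [partRow_zero]
    | succ m ih =>
        intro hm
        rw [List.range_succ, List.foldl_append, ih (by omega), List.foldl_cons, List.foldl_nil]
        have hmlen : m < (g.getD a []).length := by omega
        have hread : PySem.List.pyGetD (partRow g a m) ((m : Nat) : Int) "" = (g.getD a []).getD m "" := by
          rw [PySem.List.pyGetD_natCast, List.getD_eq_getElem _ "" (by rw [length_partRow]; omega),
            getElem_partRow g a m m hmlen (by rw [length_partRow]; omega), if_neg (by omega)]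
        have hfilter : ((((List.range m ++ [m]).filter (predC g a)).length : Nat) : Int)
            = (((List.range m).filter (predC g a)).length : Int) + (if predC g a m then 1 else 0) := by
          rw [List.filter_append]
          by_cases hp : predC g a m
          · simp [hp]
          · simp [hp]
        have hset : PySem.List.pySetD (partRow g a m) ((m : Nat) : Int) "." = (partRow g a m).set m "." := by
          unfold PySem.List.pySetD
          rw [PySem.List.pySet?_natCast _ _ _ (by rw [length_partRow]; omega)]
          rfl
        dsimp only
        rw [hread]
        by_cases hc : (g.getD a []).getD m "" = "@"
        · rw [if_pos hc, cntB_eq g hg a m ha hmlen hc]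
          by_cases hq : cnt8 g (a : Int) (m : Int) < 4
          · have hp : predC g a m = true := by
              unfold predC
              rw [show cellOf g a m = "@" from hc]
              simp [hq]
            rw [if_pos hq, hset, partRow_set g a m hmlen hp, hfilter, if_pos hp]
            refine Prod.ext ?_ rfl
            show r0 + _ + 1 = r0 + (_ + 1)
            ring
          · have hp : ¬ predC g a m = true := by
              unfold predC
              simp [hq]
            rw [if_neg hq, hfilter, if_neg hp, partRow_frozen g a m hp]
            refine Prod.ext ?_ rfl
            show r0 + _ = r0 + (_ + 0)
            ring
        · have hp : ¬ predC g a m = true := by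
            unfold predC
            simp only [Bool.and_eq_true, beq_iff_eq, decide_eq_true_eq, not_and, not_lt]
            intro hcc
            exact absurd hcc hc
          rw [if_neg hc, hfilter, if_neg hp, partRow_frozen g a m hp]
          refine Prod.ext ?_ rfl
          show r0 + _ = r0 + (_ + 0)
          ring
  have := main (g.getD a []).length (le_refl _)
  rw [this, partRow_last]

theorem roundB_eq (g : List (List String)) (hg : Rect g) :
    roundB g = (((coordsC g).length : Int), stepG g) := by
  unfold roundB
  rw [foldl_pair_acc _ _ (fun ir => (((List.range ir.2.length).filter (predC g ir.1.toNat)).length : Int))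
    (fun ir => [newRowC g ir.1.toNat]) ?_]
  · refine Prod.ext ?_ ?_
    · show 0 + ((PySem.List.enumerate g 0).map _).sum = ((coordsC g).length : Int)
      rw [zero_add]
      unfold coordsC
      rw [length_flatMap_int (List.range g.length)
        (fun a => ((List.range (g.getD a []).length).filter (predC g a)).map (pairC a))]
      show _ = ((List.range g.length).map _).sum
      rw [PySem.List.enumerate_eq_map_pyRange g [], PySem.List.pyRange_one]
      simp only [PySem.List.len, Int.sub_zero, Int.toNat_natCast, zero_add, List.map_map]
      refine congrArg List.sum (List.map_congr_left ?_)
      intro k _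
      simp only [Function.comp_apply, Int.toNat_natCast, PySem.List.pyGetD_natCast,
        List.length_map]
    · show [] ++ (PySem.List.enumerate g 0).flatMap (fun ir => [newRowC g ir.1.toNat]) = stepG g
      rw [List.nil_append,
        show (fun ir : Int × List String => [newRowC g ir.1.toNat])
          = fun ir : Int × List String => [(fun p : Int × List String => newRowC g p.1.toNat) ir] from rfl,
        ← List.map_eq_flatMap, PySem.List.enumerate_eq_map_pyRange g [], PySem.List.pyRange_one]
      simp only [PySem.List.len, Int.sub_zero, Int.toNat_natCast, zero_add, List.map_map]
      unfold stepG
      refine List.map_congr_left ?_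
      intro k _
      simp only [Function.comp_apply, Int.toNat_natCast]
  · intro st ir hir
    obtain ⟨k, hk, rfl⟩ := (PySem.List.mem_enumerate_iff g 0 _).1 hir
    dsimp only
    simp only [zero_add, Int.toNat_natCast]
    rw [show g[k] = g.getD k [] from (List.getD_eq_getElem g [] hk).symm,
      rowScanB_eq g hg k hk st.1]

theorem rect_stepG (g : List (List String)) (hg : Rect g) : Rect (stepG g) := by
  intro row hrow
  obtain ⟨a, haR, rfl⟩ := List.mem_map.1 hrow
  have ha : a < g.length := List.mem_range.1 haR
  obtain ⟨m, hm⟩ : ∃ m, g.length = m + 1 := ⟨g.length - 1, by omega⟩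
  have hhead : (stepG g).headD [] = newRowC g 0 := by
    unfold stepG
    rw [hm, List.range_succ_eq_map]
    simp
  rw [hhead, length_newRowC, length_newRowC, rect_row_len g hg a ha,
    rect_row_len g hg 0 (by omega)]

-- the no-'@' case
theorem foldl_id {α β : Type} (l : List α) (st : β) : l.foldl (fun s _ => s) st = st := by
  induction l <;> simp_all

theorem foldl_eq_init {α β : Type} (l : List α) (f : β → α → β) (init : β)
    (h : ∀ acc : β, ∀ x ∈ l, f acc x = acc) : l.foldl f init = init :=
  (PySem.List.foldl_congr_mem l f (fun s _ => s) init h).trans (foldl_id l init)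

theorem snd_mem_of_mem_enumerate {α : Type} {x : Int × α} {l : List α} {s : Int}
    (h : x ∈ PySem.List.enumerate l s) : x.2 ∈ l := by
  rcases (PySem.List.mem_enumerate_iff l s x).1 h with ⟨k, hk, rfl⟩
  exact List.getElem_mem hk

theorem part1A_no_at (g : List (List String)) (hg : ∀ row ∈ g, "@" ∉ row) :
    part1A g = (0, []) := by
  unfold part1A
  refine foldl_eq_init _ _ _ ?_
  intro st ir hir
  refine foldl_eq_init _ _ _ ?_
  intro st2 jc hjc
  have h2 : jc.2 ∈ ir.2 := snd_mem_of_mem_enumerate hjc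
  have hne : jc.2 ≠ "@" := fun he => hg ir.2 (snd_mem_of_mem_enumerate hir) (he ▸ h2)
  simp [hne]

theorem rowScanB_no_at (h : List (List Int)) (glen i : Int) (row : List String) (r0 : Int)
    (hrow : "@" ∉ row) : rowScanB h glen i row r0 = (r0, row) := by
  unfold rowScanB
  have key : ∀ l : List Int, (∀ j ∈ l, 0 ≤ j ∧ j < (row.length : Int)) →
      l.foldl (fun st j =>
        if PySem.List.pyGetD st.2 j "" = "@" then
          if cntB h glen i j < 4 then (st.1 + 1, PySem.List.pySetD st.2 j ".") else st
        else st) (r0, row) = (r0, row) := by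
    intro l
    induction l with
    | nil => intro _; rfl
    | cons j l ih =>
        intro hb
        rw [List.foldl_cons]
        have hjr := hb j (by simp)
        have hmem : PySem.List.pyGetD row j "" ∈ row :=
          PySem.List.pyGetD_mem row "" (by constructor <;> omega)
        have : PySem.List.pyGetD (r0, row).2 j "" ≠ "@" := fun he => hrow (he ▸ hmem)
        rw [if_neg this]
        exact ih (fun x hx => hb x (by simp [hx]))
  exact key _ (fun j hj => by
    have := (PySem.List.mem_pyRange_one).1 hj
    exact ⟨this.1, this.2⟩)

theorem roundB_no_at (g : List (List String)) (hg : ∀ row ∈ g, "@" ∉ row) :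
    roundB g = (0, g) := by
  unfold roundB
  rw [foldl_pair_acc _ _ (fun _ => 0) (fun ir => [ir.2])
    (by
      intro st ir hir
      have := rowScanB_no_at ((g.map ind1).map triples) (g.length : Int) ir.1 ir.2 st.1
        (hg ir.2 (snd_mem_of_mem_enumerate hir))
      simp only [this]
      simp)]
  refine Prod.ext ?_ ?_
  · simp [List.sum_eq_zero]
  · show [] ++ (PySem.List.enumerate g 0).flatMap (fun ir => [ir.2]) = g
    simp only [List.nil_append]
    rw [show (fun ir : Int × List String => [ir.2]) = (fun ir : Int × List String => [(fun p : Int × List String => p.2) ir]) from rfl]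
    rw [← List.map_eq_flatMap]
    exact PySem.List.map_snd_enumerate g 0

theorem loop_eq (fuel : Nat) :
    ∀ (g : List (List String)) (tot : Int) (maps : List (List (List String))), Rect g →
    loopA fuel g tot maps = loopB fuel g tot maps := by
  induction fuel with
  | zero => intro g tot maps _; rfl
  | succ fuel ih =>
      intro g tot maps hg
      show (let pr := part1A g; let tot' := tot + pr.1; let g' := pr.2.foldl setDot g;
            let maps' := maps ++ [g'];
            if pr.1 = 0 then (tot', maps') else loopA fuel g' tot' maps') = _
      rw [part1A_eq_coordsC g hg]
      show (if ((coordsC g).length : Int) = 0 then (tot + _, maps ++ [(coordsC g).foldl setDot g])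
            else loopA fuel ((coordsC g).foldl setDot g) (tot + _) (maps ++ [(coordsC g).foldl setDot g])) = _
      rw [foldl_setDot_coordsC g hg]
      show _ = (let pr := roundB g; let tot' := tot + pr.1; let maps' := maps ++ [pr.2];
            if pr.1 = 0 then (tot', maps') else loopB fuel pr.2 tot' maps')
      rw [roundB_eq g hg]
      by_cases h0 : ((coordsC g).length : Int) = 0
      · simp [h0]
      · simp only [h0, if_false]
        exact ih (stepG g) _ _ (rect_stepG g hg)


-- ===== VERDICT (by name: the statement is the Claim_ definition above) =====
theorem part2_spec : Claim_equal_part2 := by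
  intro g _ hpre
  show part2 g = part2_alt g
  rcases hpre with hrect | hno
  · show loopA (cellCountA g + 1) g 0 [g] = loopB (cellCountB g + 1) g 0 [g]
    rw [show cellCountB g = cellCountA g from rfl]
    exact loop_eq _ g 0 [g] hrect
  · show loopA (cellCountA g + 1) g 0 [g] = loopB (cellCountB g + 1) g 0 [g]
    rw [show cellCountB g = cellCountA g from rfl]
    simp only [loopA, loopB, part1A_no_at g hno, roundB_no_at g hno]
    rfl
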